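-- pv_equiv track=rewrite | github.com/dylsugar/ML_1 | hw1.py | string_explosion
-- ===== SOURCE A (Python) =====
-- def string_explosion(string):
--     if string == '':
--         return ''
--     else:
--         if string == None:
--             return ''
--         else:
--             return string + string_explosion(string[1:])
-- ===== SOURCE B (Python) =====
-- def string_explosion(string):
--     if not string:
--         return ''
--     result = ''
--     for i in range(len(string)):
--         result += string[i:]
--     return result
-- ===== Notes on version B (the rewrite author's own statement) =====
-- stated objective: idiomatic
-- what changed: Replaced the recursion over string[1:] with an iterative index loop accumulating string[i:] for i in range(len(string)).
import Mathlib
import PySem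

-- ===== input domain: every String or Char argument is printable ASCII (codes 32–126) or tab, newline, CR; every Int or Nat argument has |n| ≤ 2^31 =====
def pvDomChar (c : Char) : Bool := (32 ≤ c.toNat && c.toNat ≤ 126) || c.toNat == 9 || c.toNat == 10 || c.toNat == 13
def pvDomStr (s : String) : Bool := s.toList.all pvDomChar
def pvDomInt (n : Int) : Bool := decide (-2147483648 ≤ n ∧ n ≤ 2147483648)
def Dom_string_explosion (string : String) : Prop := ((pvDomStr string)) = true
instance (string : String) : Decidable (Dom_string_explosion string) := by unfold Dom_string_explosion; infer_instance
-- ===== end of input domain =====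

-- B replaces A's recursion over string[1:] with an iterative index loop accumulating string[i:] (alternative decomposition, same cost).

-- ===== PORT A =====
-- A's recursion: '' -> '' (the None branch is unreachable for a String argument), else string + string_explosion(string[1:])
def stringExplosionRecA : List Char → List Char
  | [] => []
  | c :: rest => (c :: rest) ++ stringExplosionRecA rest

def string_explosion (string : String) : String :=
  String.mk (stringExplosionRecA string.toList)

-- ===== PORT B =====
-- if not string: return ''; result = ''; for i in range(len(string)): result += string[i:]
def string_explosion_alt (string : String) : String :=
  if string.toList.isEmpty then "" else
    String.mk ((List.range string.toList.length).foldl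
      (fun acc i => acc ++ string.toList.drop i) [])

-- ===== PRECONDITION & SPEC =====
def Spec_string_explosion (string : String) (out : String) : Prop := out = string_explosion_alt string
instance (string : String) (out : String) : Decidable (Spec_string_explosion string out) := by unfold Spec_string_explosion; infer_instance

-- ===== CLAIM (what is proved, stated in full; the proofs are below) =====
def Claim_equal_string_explosion : Prop := ∀ (string : String), Dom_string_explosion string → Spec_string_explosion string (string_explosion string)

-- ===== LEMMAS AND PROOFS =====
theorem stringExplosionRecA_eq_flatMap (l : List Char) :
    stringExplosionRecA l = (List.range l.length).flatMap (fun i => l.drop i) := by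
  induction l with
  | nil => simp [stringExplosionRecA]
  | cons c rest ih =>
    simp only [stringExplosionRecA, ih, List.length_cons, List.range_succ_eq_map,
      List.flatMap_cons, List.flatMap_map, List.drop_succ_cons, List.drop_zero]

-- ===== VERDICT (by name: the statement is the Claim_ definition above) =====
theorem string_explosion_spec : Claim_equal_string_explosion := by
  intro s _
  unfold Spec_string_explosion string_explosion string_explosion_alt
  rw [PySem.List.foldl_append_eq_flatMap]
  rcases h : s.toList with _ | ⟨c, rest⟩
  · simp; rfl
  · simp [stringExplosionRecA_eq_flatMap]
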